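-- pv_equiv track=rewrite | github.com/Vauxoo/addons-clearcorp | budget/models/budget_program.py | make_composite_name
-- ===== SOURCE A (Python) =====
-- def make_composite_name(cr,uid,str):
--     lst = []
--     composite_name = ""
--     space_pos = str.find(' ')
--     if space_pos != -1:
--         lst.append(str[0:space_pos])
--         lst.append(str[space_pos+1:len(str)-1])
--     else:
--         lst.append(str[0:len(str)-1])
--     for word in lst:
--         if len(word)>=3:
--             composite_name = composite_name + word[0:3] +'-'
--         else:
--             composite_name = composite_name + word +'-'
--     return composite_name[0:-1]
-- ===== SOURCE B (Python) =====
-- def make_composite_name(cr, uid, str):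
--     # Single left-to-right character scan (state machine): no slicing, no word lists.
--     # State: whether the first space was seen yet, and how many chars of the
--     # current word were already kept (at most 3). The final character of the
--     # string is never kept as a word character.
--     out = []
--     seen_space = False
--     count = 0
--     last = len(str) - 1
--     for i, c in enumerate(str):
--         if not seen_space and c == ' ':
--             out.append('-')
--             seen_space = True
--             count = 0
--         else:
--             if i != last and count < 3:
--                 out.append(c)
--             count += 1
--     return ''.join(out)
-- ===== Notes on version B (the rewrite author's own statement) =====
-- stated objective: alternative
-- what changed: Replaces A's find-the-space/if-else slicing into a word list plus an accumulate-then-strip-dash loop by a single character-level scan with a state machine (seen-space flag, per-word kept-char counter, last-index check) that emits the output directly with no intermediate word lists or slices.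
import Mathlib
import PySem

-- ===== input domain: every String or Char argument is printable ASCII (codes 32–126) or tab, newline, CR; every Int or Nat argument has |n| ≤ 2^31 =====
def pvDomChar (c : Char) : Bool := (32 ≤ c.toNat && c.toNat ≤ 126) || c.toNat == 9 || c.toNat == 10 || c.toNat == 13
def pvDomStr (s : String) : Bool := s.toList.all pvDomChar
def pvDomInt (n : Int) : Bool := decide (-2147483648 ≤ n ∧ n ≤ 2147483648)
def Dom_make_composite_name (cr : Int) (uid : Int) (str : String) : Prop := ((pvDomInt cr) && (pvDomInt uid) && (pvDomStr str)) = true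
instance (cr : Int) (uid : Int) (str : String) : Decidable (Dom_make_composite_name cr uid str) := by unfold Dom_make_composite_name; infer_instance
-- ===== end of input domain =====

-- B replaces A's find-the-space/if-else slicing plus accumulate-then-strip-dash loop
-- by a single character-level state-machine scan that emits the output directly (alternative).


-- ===== PORT A =====
-- A, transliterated on the code-point list (PySem.Str.* are thin wrappers over these):
-- find ' ', slice out one or two words, fold appending 3-char prefix + '-', strip last char.
def pvACore (cs : List Char) : List Char :=
  let space_pos := PySem.Chars.find cs [' ']
  let lst : List (List Char) :=
    if space_pos ≠ -1 then
      [PySem.Chars.slice cs (some 0) (some space_pos),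
       PySem.Chars.slice cs (some (space_pos + 1)) (some ((cs.length : Int) - 1))]
    else
      [PySem.Chars.slice cs (some 0) (some ((cs.length : Int) - 1))]
  let composite_name := lst.foldl (fun acc word =>
      if 3 ≤ PySem.Chars.len word then acc ++ PySem.Chars.slice word (some 0) (some 3) ++ ['-']
      else acc ++ word ++ ['-']) []
  PySem.Chars.slice composite_name none (some (-1))

def make_composite_name (cr : Int) (uid : Int) (str : String) : String :=
  String.ofList (pvACore str.toList)

-- ===== PORT B =====
-- B, transliterated: one pass over the enumerated characters with state
-- (seen_space : Bool, count : Int); the emitted characters are produced in order.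
def pvBGo (last : Int) : Int → Bool → Int → List Char → List Char
  | _, _, _, [] => []
  | i, seen_space, count, c :: rest =>
    if !seen_space && c == ' ' then
      '-' :: pvBGo last (i + 1) true 0 rest
    else
      if i ≠ last ∧ count < 3 then c :: pvBGo last (i + 1) seen_space (count + 1) rest
      else pvBGo last (i + 1) seen_space (count + 1) rest

def make_composite_name_alt (cr : Int) (uid : Int) (str : String) : String :=
  String.ofList (pvBGo ((str.toList.length : Int) - 1) 0 false 0 str.toList)

-- ===== PRECONDITION & SPEC =====
def Spec_make_composite_name (cr : Int) (uid : Int) (str : String) (out : String) : Prop := out = make_composite_name_alt cr uid str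
instance (cr : Int) (uid : Int) (str : String) (out : String) : Decidable (Spec_make_composite_name cr uid str out) := by unfold Spec_make_composite_name; infer_instance

-- ===== CLAIM (what is proved, stated in full; the proofs are below) =====
def Claim_equal_make_composite_name : Prop := ∀ (cr : Int) (uid : Int) (str : String), Dom_make_composite_name cr uid str → Spec_make_composite_name cr uid str (make_composite_name cr uid str)

-- ===== LEMMAS AND PROOFS =====

-- ---- A-side: locating the first space ----
theorem find_go_no_space (cs : List Char) (k : Nat) (h : ' ' ∉ cs) :
    PySem.Chars.find.go [' '] cs k = -1 := by
  induction cs generalizing k with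
  | nil => simp [PySem.Chars.find.go]
  | cons c t ih =>
    have hc : c ≠ ' ' := fun hc => h (by simp [hc])
    simp [PySem.Chars.find.go, List.isPrefixOf, Ne.symm hc]
    exact ih (k + 1) (fun hm => h (List.mem_cons_of_mem _ hm))

theorem find_go_space (pre post : List Char) (k : Nat) (h : ' ' ∉ pre) :
    PySem.Chars.find.go [' '] (pre ++ ' ' :: post) k = (k : Int) + pre.length := by
  induction pre generalizing k with
  | nil => simp [PySem.Chars.find.go, List.isPrefixOf]
  | cons c t ih =>
    have hc : c ≠ ' ' := fun hc => h (by simp [hc])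
    simp only [List.cons_append]
    simp [PySem.Chars.find.go, List.isPrefixOf, Ne.symm hc]
    rw [ih (k + 1) (fun hm => h (List.mem_cons_of_mem _ hm))]
    push_cast; ring

theorem find_no_space (cs : List Char) (h : ' ' ∉ cs) : PySem.Chars.find cs [' '] = -1 := by
  simp [PySem.Chars.find]; exact find_go_no_space cs 0 h

theorem find_space (pre post : List Char) (h : ' ' ∉ pre) :
    PySem.Chars.find (pre ++ ' ' :: post) [' '] = (pre.length : Int) := by
  simp [PySem.Chars.find]; rw [find_go_space pre post 0 h]; simp

theorem exists_first_space (cs : List Char) (h : ' ' ∈ cs) :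
    ∃ pre post, ' ' ∉ pre ∧ cs = pre ++ ' ' :: post := by
  induction cs with
  | nil => cases h
  | cons c t ih =>
    by_cases hc : c = ' '
    · exact ⟨[], t, by simp, by simp [hc]⟩
    · rcases ih (by rcases List.mem_cons.mp h with h1 | h2; exact absurd h1.symm hc; exact h2)
        with ⟨pre, post, hpre, heq⟩
      exact ⟨c :: pre, post, by simp [hpre, Ne.symm hc], by simp [heq]⟩

-- ---- A-side: slice and loop simplification ----
theorem slice03 (w : List Char) : PySem.Chars.slice w (some 0) (some 3) = w.take 3 := by
  simp [PySem.List.slice_to]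

theorem word3 (acc w : List Char) :
    (if 3 ≤ PySem.Chars.len w then acc ++ PySem.Chars.slice w (some 0) (some 3) ++ ['-']
     else acc ++ w ++ ['-']) = acc ++ w.take 3 ++ ['-'] := by
  split_ifs with h
  · rw [slice03]
  · rw [List.take_of_length_le (by simp [PySem.Chars.len_eq] at h ⊢; omega)]

theorem slice_len_sub_one (cs : List Char) :
    PySem.Chars.slice cs (some 0) (some ((cs.length : Int) - 1)) = cs.dropLast := by
  cases cs with
  | nil => simp [PySem.List.slice_to_neg_one]
  | cons c t =>
    have : ((c :: t).length : Int) - 1 = ((t.length : Nat) : Int) := by simp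
    rw [this]
    simp [PySem.List.slice_to_natCast, List.dropLast_eq_take]

-- A's value in closed form, no-space case
theorem pvACore_no_space (cs : List Char) (h : ' ' ∉ cs) :
    pvACore cs = cs.dropLast.take 3 := by
  simp only [pvACore, find_no_space cs h]
  rw [if_neg (by simp)]
  rw [slice_len_sub_one]
  simp only [List.foldl, word3]
  simp only [List.nil_append, PySem.Chars.slice_eq_listSlice,
    PySem.List.slice_to_neg_one, List.dropLast_concat]

-- A's value in closed form, first-space case
theorem pvACore_space (pre post : List Char) (h : ' ' ∉ pre) :
    pvACore (pre ++ ' ' :: post) = pre.take 3 ++ '-' :: post.dropLast.take 3 := by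
  have hif : ((pre.length : Int) ≠ -1) := by omega
  simp only [pvACore, find_space pre post h]
  rw [if_pos hif]
  have h1 : PySem.Chars.slice (pre ++ ' ' :: post) (some 0) (some (pre.length : Int)) = pre := by
    simp [PySem.List.slice_to_natCast]
  have h2 : PySem.Chars.slice (pre ++ ' ' :: post) (some ((pre.length : Int) + 1))
      (some (((pre ++ ' ' :: post).length : Int) - 1)) = post.dropLast := by
    have ha : ((pre.length : Int) + 1) = ((pre.length + 1 : Nat) : Int) := by push_cast; ring
    have hb : (((pre ++ ' ' :: post).length : Int) - 1)
        = ((pre.length + post.length : Nat) : Int) := by simp; omega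
    rw [ha, hb]
    simp only [PySem.Chars.slice_eq_listSlice, PySem.List.slice_natCast]
    have hd : (pre ++ ' ' :: post).drop (pre.length + 1) = post := by
      rw [show pre ++ ' ' :: post = (pre ++ [' ']) ++ post by simp,
          show pre.length + 1 = (pre ++ [' ']).length by simp]
      simp
    rw [hd, show pre.length + post.length - (pre.length + 1) = post.length - 1 by omega,
        List.dropLast_eq_take]
  rw [h1, h2]
  simp only [List.foldl, word3]
  simp only [List.nil_append, PySem.Chars.slice_eq_listSlice,
    PySem.List.slice_to_neg_one, List.dropLast_concat]
  simp

-- ---- B-side: the scan in closed form ----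
-- Word phase (seen_space = true, or seen_space = false over a space-free suffix):
-- scanning the remaining suffix cs at index i with i + cs.length = last + 1 keeps
-- the first (3 - count) characters of cs.dropLast.
theorem pvBGo_word (seen : Bool) (cs : List Char) (last i count : Int)
    (hi : i + cs.length = last + 1) (hs : seen = true ∨ ' ' ∉ cs) :
    pvBGo last i seen count cs = cs.dropLast.take (3 - count).toNat := by
  induction cs generalizing i count with
  | nil => simp [pvBGo]
  | cons c rest ih =>
    have hcsp : ¬(!seen && c == ' ') = true := by
      rcases hs with hs | hs
      · simp [hs]
      · have : c ≠ ' ' := fun hc => hs (by simp [hc])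
        simp [this]
    rw [pvBGo, if_neg hcsp]
    have hs' : seen = true ∨ ' ' ∉ rest := by
      rcases hs with hs | hs
      · exact Or.inl hs
      · exact Or.inr fun hm => hs (List.mem_cons_of_mem _ hm)
    cases rest with
    | nil =>
      have hlast : i = last := by simp at hi; omega
      rw [if_neg (by simp [hlast])]
      simp [pvBGo]
    | cons d t =>
      have hne : i ≠ last := by simp at hi; omega
      have hrec := ih (i := i + 1) (count := count + 1) (by simp at hi ⊢; omega) hs'
      by_cases hc : count < 3
      · rw [if_pos ⟨hne, hc⟩, hrec]
        have : (3 - count).toNat = ((3 - (count + 1)).toNat) + 1 := by omega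
        rw [this]
        simp [List.dropLast_cons_of_ne_nil]
      · rw [if_neg (by tauto), hrec]
        have h1 : (3 - count).toNat = 0 := by omega
        have h2 : (3 - (count + 1)).toNat = 0 := by omega
        simp [h1, h2]

-- Pre-space phase: scanning pre ++ ' ' :: post (pre space-free) with seen_space = false
-- emits the first (3 - count) characters of pre, then '-', then the word-phase scan of post.
theorem pvBGo_pre (pre post : List Char) (last i count : Int) (h : ' ' ∉ pre)
    (hi : i + (pre ++ ' ' :: post).length = last + 1) :
    pvBGo last i false count (pre ++ ' ' :: post)
      = pre.take (3 - count).toNat ++ '-' :: pvBGo last (i + pre.length + 1) true 0 post := by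
  induction pre generalizing i count with
  | nil => simp [pvBGo]
  | cons c t ih =>
    have hc : c ≠ ' ' := fun hc => h (by simp [hc])
    have ht : ' ' ∉ t := fun hm => h (List.mem_cons_of_mem _ hm)
    have hil : i ≠ last := by simp at hi; omega
    have hi' : (i + 1) + ((t ++ ' ' :: post).length : Int) = last + 1 := by
      simp at hi ⊢; omega
    have hidx : (i + 1) + ((t.length : Int)) + 1 = i + (((c :: t).length : Int)) + 1 := by
      simp; ring
    simp only [List.cons_append]
    rw [pvBGo, if_neg (by simp [hc])]
    by_cases hcnt : count < 3
    · rw [if_pos ⟨hil, hcnt⟩, ih (i := i + 1) (count := count + 1) ht hi', hidx]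
      have : (3 - count).toNat = ((3 - (count + 1)).toNat) + 1 := by omega
      rw [this]
      simp
    · rw [if_neg (by tauto), ih (i := i + 1) (count := count + 1) ht hi', hidx]
      have h1 : (3 - count).toNat = 0 := by omega
      have h2 : (3 - (count + 1)).toNat = 0 := by omega
      simp [h1, h2]

theorem core_eq (cs : List Char) :
    pvACore cs = pvBGo ((cs.length : Int) - 1) 0 false 0 cs := by
  by_cases h : ' ' ∈ cs
  · obtain ⟨pre, post, hpre, rfl⟩ := exists_first_space cs h
    rw [pvACore_space pre post hpre, pvBGo_pre pre post _ 0 0 hpre (by simp only [List.length_append, List.length_cons]; push_cast; ring)]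
    rw [pvBGo_word true post _ _ 0 (by simp only [List.length_append, List.length_cons]; push_cast; ring) (Or.inl rfl)]
    rfl
  · rw [pvACore_no_space cs h,
      pvBGo_word false cs _ 0 0 (by omega) (Or.inr h)]
    rfl

-- ===== VERDICT (by name: the statement is the Claim_ definition above) =====
theorem make_composite_name_spec : Claim_equal_make_composite_name := by
  intro cr uid s _
  unfold Spec_make_composite_name make_composite_name make_composite_name_alt
  exact congrArg String.ofList (core_eq s.toList)
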